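-- pv_equiv track=rewrite | github.com/Per48edjes/Misc-DSA-Practice | aoc_2022/day_10/day_10.py | x_reg_cycle_values
-- ===== SOURCE A (Python) =====
-- from typing import Generator, Iterable, List, Tuple, Union
--
-- def x_reg_cycle_values(
--     instructions: List[Union[Tuple[str, int], Tuple[str]]]
-- ) -> Generator[int, None, None]:
--
--     x_reg = 1
--
--     for instruction in instructions:
--         match instruction[0]:
--             case "addx":
--                 cycles, V = 2, instruction[1]
--             case "noop":
--                 cycles, V = 1, None
--             case _:
--                 raise ValueError
--         for cycle_i in range(cycles):
--             yield x_reg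
--             x_reg += V if cycle_i and V else 0
-- ===== SOURCE B (Python) =====
-- def x_reg_cycle_values(instructions):
--     # Build the per-cycle delta stream first, then one uniform prefix-sum sweep.
--     deltas = []
--     for instruction in instructions:
--         op = instruction[0]
--         if op == "noop":
--             deltas.append(0)
--         elif op == "addx":
--             deltas.extend((0, instruction[1]))
--         else:
--             raise ValueError
--     x = 1
--     for d in deltas:
--         yield x
--         x += d
-- ===== Notes on version B (the rewrite author's own statement) =====
-- stated objective: alternative
-- what changed: Replaces the nested loop with its conditional accumulator trick by a build-then-sweep decomposition: first flatten instructions into a per-cycle delta stream (noop -> [0], addx V -> [0, V]), then one uniform pass yields the running prefix sum.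
import Mathlib
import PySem

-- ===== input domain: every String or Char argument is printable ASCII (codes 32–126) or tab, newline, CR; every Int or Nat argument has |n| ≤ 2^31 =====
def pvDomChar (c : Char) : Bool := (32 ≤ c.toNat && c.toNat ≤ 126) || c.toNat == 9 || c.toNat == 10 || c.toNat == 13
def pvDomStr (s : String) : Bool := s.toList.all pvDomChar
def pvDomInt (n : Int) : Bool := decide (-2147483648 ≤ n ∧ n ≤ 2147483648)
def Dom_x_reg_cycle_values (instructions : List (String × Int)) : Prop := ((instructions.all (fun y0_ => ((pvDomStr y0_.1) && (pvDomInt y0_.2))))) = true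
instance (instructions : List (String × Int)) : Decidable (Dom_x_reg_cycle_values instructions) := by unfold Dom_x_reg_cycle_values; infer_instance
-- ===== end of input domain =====

-- B replaces A's nested loop (accumulator updated by a truthiness-guarded increment) with a
-- build-then-sweep decomposition: flatten to a per-cycle delta stream, then one prefix-sum pass.

-- ===== PORT A =====
-- A: for each instruction, match opcode to (cycles, V : Option Int); the inner loop over
-- range(cycles) yields x_reg then does x_reg += V if cycle_i and V else 0 (None/0 are falsy).
-- On an unknown opcode A raises ValueError (excluded by Pre_); the port keeps the state unchanged there.
def x_reg_cycle_values (instructions : List (String × Int)) : List Int :=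
  (instructions.foldl (fun (st : Int × List Int) instr =>
    match (if instr.1 = "addx" then some ((2 : Int), some instr.2)
           else if instr.1 = "noop" then some ((1 : Int), (none : Option Int))
           else none) with
    | none => st
    | some (cycles, V) =>
        (PySem.List.pyRange 0 cycles 1).foldl (fun (st2 : Int × List Int) cycle_i =>
          (st2.1 + (if cycle_i ≠ 0 ∧ V.getD 0 ≠ 0 then V.getD 0 else 0),
           st2.2 ++ [st2.1])) st) ((1 : Int), ([] : List Int))).2

-- ===== PORT B =====
def x_reg_cycle_values_alt (instructions : List (String × Int)) : List Int :=
  let deltas := instructions.foldl (fun (acc : List Int) instr =>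
    if instr.1 = "noop" then acc ++ [0]
    else if instr.1 = "addx" then acc ++ [0, instr.2]
    else acc) []
  (deltas.foldl (fun (st : Int × List Int) d => (st.1 + d, st.2 ++ [st.1]))
    ((1 : Int), ([] : List Int))).2

-- ===== PRECONDITION & SPEC =====
-- Pre_ excludes exactly the inputs with an opcode other than "addx"/"noop", on which A raises ValueError.
def Pre_x_reg_cycle_values (instructions : List (String × Int)) : Prop :=
  ∀ p ∈ instructions, p.1 = "addx" ∨ p.1 = "noop"
instance (instructions : List (String × Int)) : Decidable (Pre_x_reg_cycle_values instructions) := by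
  unfold Pre_x_reg_cycle_values; infer_instance
def pvWitness_x_reg_cycle_values : (List (String × Int)) := [("addx", -3), ("noop", 0), ("addx", 7)]

def Spec_x_reg_cycle_values (instructions : List (String × Int)) (out : List Int) : Prop := out = x_reg_cycle_values_alt instructions
instance (instructions : List (String × Int)) (out : List Int) : Decidable (Spec_x_reg_cycle_values instructions out) := by unfold Spec_x_reg_cycle_values; infer_instance

-- ===== CLAIM (what is proved, stated in full; the proofs are below) =====
def Claim_equal_x_reg_cycle_values : Prop := ∀ (instructions : List (String × Int)), Dom_x_reg_cycle_values instructions → Pre_x_reg_cycle_values instructions → Spec_x_reg_cycle_values instructions (x_reg_cycle_values instructions)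

-- ===== LEMMAS AND PROOFS =====

-- the delta stream, as a flatMap
def pvDeltas (instructions : List (String × Int)) : List Int :=
  instructions.flatMap (fun instr =>
    if instr.1 = "noop" then [0]
    else if instr.1 = "addx" then [0, instr.2]
    else [])

-- named copies of the two fold bodies (definitionally equal to the ports' inline lambdas)
def pvStepA (st : Int × List Int) (instr : String × Int) : Int × List Int :=
  match (if instr.1 = "addx" then some ((2 : Int), some instr.2)
         else if instr.1 = "noop" then some ((1 : Int), (none : Option Int))
         else none) with
  | none => st
  | some (cycles, V) =>
      (PySem.List.pyRange 0 cycles 1).foldl (fun (st2 : Int × List Int) cycle_i =>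
        (st2.1 + (if cycle_i ≠ 0 ∧ V.getD 0 ≠ 0 then V.getD 0 else 0),
         st2.2 ++ [st2.1])) st

def pvStepB (st : Int × List Int) (d : Int) : Int × List Int :=
  (st.1 + d, st.2 ++ [st.1])

lemma pvDeltas_foldl (instructions : List (String × Int)) (acc : List Int) :
    instructions.foldl (fun (acc : List Int) instr =>
      if instr.1 = "noop" then acc ++ [0]
      else if instr.1 = "addx" then acc ++ [0, instr.2]
      else acc) acc = acc ++ pvDeltas instructions := by
  induction instructions generalizing acc with
  | nil => simp [pvDeltas]
  | cons p rest ih =>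
      simp only [List.foldl_cons, pvDeltas, List.flatMap_cons]
      split_ifs <;> simp [ih, pvDeltas, List.append_assoc]

lemma pv_key (instructions : List (String × Int))
    (h : Pre_x_reg_cycle_values instructions) (x : Int) (acc : List Int) :
    instructions.foldl pvStepA (x, acc) =
      (pvDeltas instructions).foldl pvStepB (x, acc) := by
  induction instructions generalizing x acc with
  | nil => rfl
  | cons p rest ih =>
      have hrest : Pre_x_reg_cycle_values rest := fun q hq => h q (List.mem_cons_of_mem _ hq)
      rcases h p (List.mem_cons_self ..) with hop | hop
      · -- addx: head step yields x twice then x += V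
        have hstep : pvStepA (x, acc) p = (x + p.2, acc ++ [x, x]) := by
          by_cases hv : p.2 = 0 <;>
            simp [pvStepA, hop, hv, PySem.List.pyRange, List.range_succ]
        have hd : pvDeltas (p :: rest) = [0, p.2] ++ pvDeltas rest := by
          simp [pvDeltas, hop]
        rw [List.foldl_cons, hstep, hd, List.foldl_append, ih hrest]
        simp [pvStepB]
      · -- noop: head step yields x once
        have hstep : pvStepA (x, acc) p = (x, acc ++ [x]) := by
          simp [pvStepA, hop, PySem.List.pyRange, List.range_succ]
        have hd : pvDeltas (p :: rest) = [0] ++ pvDeltas rest := by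
          simp [pvDeltas, hop]
        rw [List.foldl_cons, hstep, hd, List.foldl_append, ih hrest]
        simp [pvStepB]

-- ===== VERDICT (by name: the statement is the Claim_ definition above) =====
theorem x_reg_cycle_values_spec : Claim_equal_x_reg_cycle_values := by
  intro instructions _ hpre
  show (instructions.foldl pvStepA ((1 : Int), ([] : List Int))).2 =
    ((instructions.foldl (fun (acc : List Int) instr =>
        if instr.1 = "noop" then acc ++ [0]
        else if instr.1 = "addx" then acc ++ [0, instr.2]
        else acc) []).foldl pvStepB ((1 : Int), ([] : List Int))).2
  rw [pv_key instructions hpre, pvDeltas_foldl]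
  simp
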